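-- pv_equiv track=rewrite | github.com/Ashika-V22/Chatbot | chatbot.py | generate_incident_response
-- ===== SOURCE A (Python) =====
-- def generate_incident_response(answers: list) -> str:
--     """
--     Takes the user's answers to incident questions and generates
--     a personalised incident response plan.
--     """
--     incident_type = answers[0].lower() if answers else ""
--
--     response = (
--         "<b>📋 Incident Report Summary</b><br>"
--         "━━━━━━━━━━━━━━━━━━━━━━━━<br>"
--         f"<b>Type:</b> {answers[0]}<br>"
--         f"<b>Time:</b> {answers[1]}<br>"
--         f"<b>Description:</b> {answers[2]}<br>"
--         f"<b>Affected:</b> {answers[3]}<br>"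
--         f"<b>Steps taken:</b> {answers[4]}<br>"
--         "━━━━━━━━━━━━━━━━━━━━━━━━<br><br>"
--         "<b>🚨 Recommended Actions:</b><br>"
--     )
--
--     # Generic steps for all incidents
--     steps = [
--         "Change passwords on ALL affected accounts immediately",
--         "Enable Two-Factor Authentication (2FA) everywhere",
--         "Check recent account activity for unauthorised actions",
--         "Inform your bank if any financial accounts are involved",
--         "Run a full antivirus/malware scan on affected devices",
--     ]
--
--     # Add specific steps based on incident type keywords
--     if any(w in incident_type for w in ["phishing", "email", "link", "attachment"]):
--         steps.append("Report the phishing email to reportphishing@apwg.org")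
--         steps.append("Mark the sender as spam and block them")
--
--     if any(w in incident_type for w in ["hack", "breach", "unauthorised", "hacked"]):
--         steps.append("Revoke all active sessions (check 'Security' settings on the platform)")
--         steps.append("Verify your recovery email/phone hasn't been changed by the attacker")
--
--     if any(w in incident_type for w in ["financial", "fraud", "bank", "money", "upi"]):
--         steps.append("Call your bank's 24/7 fraud helpline IMMEDIATELY to freeze the account")
--         steps.append("File a complaint at cybercrime.gov.in (India) or your country's cybercrime portal")
--         steps.append("Keep a record of all transaction IDs and screenshots")
--
--     if any(w in incident_type for w in ["malware", "virus", "ransomware", "infected"]):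
--         steps.append("Disconnect the device from the internet to prevent spread")
--         steps.append("Do NOT pay any ransom — restore from clean backups instead")
--         steps.append("Consult a professional IT forensics team if data is critical")
--
--     for i, step in enumerate(steps, 1):
--         response += f"{i}. {step}<br>"
--
--     response += (
--         "<br><b>🏛️ Authorities to report to (India):</b><br>"
--         "• Cyber Crime Portal: <b>cybercrime.gov.in</b><br>"
--         "• National Helpline: <b>1930</b><br>"
--         "• Local police cyber cell<br><br>"
--         "<i>Stay calm — most incidents are recoverable if acted on quickly. Type 'menu' to return to the main menu.</i>"
--     )
--
--     return response
-- ===== SOURCE B (Python) =====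
-- _GENERIC = [
--     "Change passwords on ALL affected accounts immediately",
--     "Enable Two-Factor Authentication (2FA) everywhere",
--     "Check recent account activity for unauthorised actions",
--     "Inform your bank if any financial accounts are involved",
--     "Run a full antivirus/malware scan on affected devices",
-- ]
--
-- # Flat keyword -> category-index table (category order matches the plan's sections).
-- _KEYWORDS = [
--     ("phishing", 0), ("email", 0), ("link", 0), ("attachment", 0),
--     ("hack", 1), ("breach", 1), ("unauthorised", 1), ("hacked", 1),
--     ("financial", 2), ("fraud", 2), ("bank", 2), ("money", 2), ("upi", 2),
--     ("malware", 3), ("virus", 3), ("ransomware", 3), ("infected", 3),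
-- ]
--
-- _EXTRAS = [
--     ["Report the phishing email to reportphishing@apwg.org",
--      "Mark the sender as spam and block them"],
--     ["Revoke all active sessions (check 'Security' settings on the platform)",
--      "Verify your recovery email/phone hasn't been changed by the attacker"],
--     ["Call your bank's 24/7 fraud helpline IMMEDIATELY to freeze the account",
--      "File a complaint at cybercrime.gov.in (India) or your country's cybercrime portal",
--      "Keep a record of all transaction IDs and screenshots"],
--     ["Disconnect the device from the internet to prevent spread",
--      "Do NOT pay any ransom — restore from clean backups instead",
--      "Consult a professional IT forensics team if data is critical"],
-- ]
--
--
-- def _numbered(steps, i):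
--     """Render '<i>. <step><br>' lines recursively."""
--     if not steps:
--         return ""
--     return f"{i}. {steps[0]}<br>" + _numbered(steps[1:], i + 1)
--
--
-- def generate_incident_response(answers: list) -> str:
--     """
--     Takes the user's answers to incident questions and generates
--     a personalised incident response plan.
--     """
--     incident_type = answers[0].lower() if answers else ""
--
--     # One pass over the flat keyword table collects the matched categories;
--     # extras are then emitted once, in category order.
--     matched = {cat for kw, cat in _KEYWORDS if kw in incident_type}
--     steps = _GENERIC + [s for cat in range(4) if cat in matched for s in _EXTRAS[cat]]
--
--     header = (
--         "<b>📋 Incident Report Summary</b><br>"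
--         "━━━━━━━━━━━━━━━━━━━━━━━━<br>"
--         f"<b>Type:</b> {answers[0]}<br>"
--         f"<b>Time:</b> {answers[1]}<br>"
--         f"<b>Description:</b> {answers[2]}<br>"
--         f"<b>Affected:</b> {answers[3]}<br>"
--         f"<b>Steps taken:</b> {answers[4]}<br>"
--         "━━━━━━━━━━━━━━━━━━━━━━━━<br><br>"
--         "<b>🚨 Recommended Actions:</b><br>"
--     )
--     footer = (
--         "<br><b>🏛️ Authorities to report to (India):</b><br>"
--         "• Cyber Crime Portal: <b>cybercrime.gov.in</b><br>"
--         "• National Helpline: <b>1930</b><br>"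
--         "• Local police cyber cell<br><br>"
--         "<i>Stay calm — most incidents are recoverable if acted on quickly. Type 'menu' to return to the main menu.</i>"
--     )
--     return header + _numbered(steps, 1) + footer
-- ===== Notes on version B (the rewrite author's own statement) =====
-- stated objective: alternative
-- what changed: Replaces the four hard-coded keyword if-blocks by one pass over a flat keyword->category table that collects a set of matched category indices (extras then emitted once in category order), and renders the numbered lines with a recursive helper instead of the enumerate loop with string accumulation.
import Mathlib
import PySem

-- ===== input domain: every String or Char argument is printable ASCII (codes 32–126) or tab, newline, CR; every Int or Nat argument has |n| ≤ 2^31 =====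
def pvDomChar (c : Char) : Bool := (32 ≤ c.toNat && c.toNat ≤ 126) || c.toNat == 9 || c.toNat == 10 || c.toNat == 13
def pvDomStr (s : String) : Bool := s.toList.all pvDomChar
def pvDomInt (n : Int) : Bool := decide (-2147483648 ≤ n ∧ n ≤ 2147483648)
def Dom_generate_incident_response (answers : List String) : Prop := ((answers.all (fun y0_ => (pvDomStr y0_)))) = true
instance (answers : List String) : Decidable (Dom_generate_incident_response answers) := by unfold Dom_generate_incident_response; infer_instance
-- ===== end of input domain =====

-- B replaces A's four hard-coded keyword if-blocks by one pass over a flat keyword->category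
-- table collecting a set of matched category indices (extras emitted once, in category order),
-- and renders the numbered lines with a recursive helper instead of the enumerate loop
-- (objective: alternative).

-- ===== PORT A =====
-- answers[i] is in range on every input admitted by Pre_ (length ≥ 5), so pyGetD's default is never used.
def generate_incident_response (answers : List String) : String :=
  let incident_type : String :=
    if answers.isEmpty then "" else PySem.Str.lower (PySem.List.pyGetD answers 0 "")
  let response : String :=
    "<b>📋 Incident Report Summary</b><br>" ++
    "━━━━━━━━━━━━━━━━━━━━━━━━<br>" ++
    "<b>Type:</b> " ++ PySem.List.pyGetD answers 0 "" ++ "<br>" ++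
    "<b>Time:</b> " ++ PySem.List.pyGetD answers 1 "" ++ "<br>" ++
    "<b>Description:</b> " ++ PySem.List.pyGetD answers 2 "" ++ "<br>" ++
    "<b>Affected:</b> " ++ PySem.List.pyGetD answers 3 "" ++ "<br>" ++
    "<b>Steps taken:</b> " ++ PySem.List.pyGetD answers 4 "" ++ "<br>" ++
    "━━━━━━━━━━━━━━━━━━━━━━━━<br><br>" ++
    "<b>🚨 Recommended Actions:</b><br>"
  let steps : List String :=
    [ "Change passwords on ALL affected accounts immediately",
      "Enable Two-Factor Authentication (2FA) everywhere",
      "Check recent account activity for unauthorised actions",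
      "Inform your bank if any financial accounts are involved",
      "Run a full antivirus/malware scan on affected devices" ]
  let steps :=
    if ["phishing", "email", "link", "attachment"].any (fun w => PySem.Str.isIn w incident_type) then
      steps ++ ["Report the phishing email to reportphishing@apwg.org",
                "Mark the sender as spam and block them"]
    else steps
  let steps :=
    if ["hack", "breach", "unauthorised", "hacked"].any (fun w => PySem.Str.isIn w incident_type) then
      steps ++ ["Revoke all active sessions (check 'Security' settings on the platform)",
                "Verify your recovery email/phone hasn't been changed by the attacker"]
    else steps
  let steps :=
    if ["financial", "fraud", "bank", "money", "upi"].any (fun w => PySem.Str.isIn w incident_type) then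
      steps ++ ["Call your bank's 24/7 fraud helpline IMMEDIATELY to freeze the account",
                "File a complaint at cybercrime.gov.in (India) or your country's cybercrime portal",
                "Keep a record of all transaction IDs and screenshots"]
    else steps
  let steps :=
    if ["malware", "virus", "ransomware", "infected"].any (fun w => PySem.Str.isIn w incident_type) then
      steps ++ ["Disconnect the device from the internet to prevent spread",
                "Do NOT pay any ransom — restore from clean backups instead",
                "Consult a professional IT forensics team if data is critical"]
    else steps
  let response :=
    (PySem.List.enumerate steps 1).foldl
      (fun acc p => acc ++ (PySem.Int.toStr p.1 ++ ". " ++ p.2 ++ "<br>")) response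
  response ++
    ("<br><b>🏛️ Authorities to report to (India):</b><br>" ++
     "• Cyber Crime Portal: <b>cybercrime.gov.in</b><br>" ++
     "• National Helpline: <b>1930</b><br>" ++
     "• Local police cyber cell<br><br>" ++
     "<i>Stay calm — most incidents are recoverable if acted on quickly. Type 'menu' to return to the main menu.</i>")

-- ===== PORT B =====
def pvGeneric : List String :=
  [ "Change passwords on ALL affected accounts immediately",
    "Enable Two-Factor Authentication (2FA) everywhere",
    "Check recent account activity for unauthorised actions",
    "Inform your bank if any financial accounts are involved",
    "Run a full antivirus/malware scan on affected devices" ]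

def pvKeywords : List (String × Int) :=
  [ ("phishing", 0), ("email", 0), ("link", 0), ("attachment", 0),
    ("hack", 1), ("breach", 1), ("unauthorised", 1), ("hacked", 1),
    ("financial", 2), ("fraud", 2), ("bank", 2), ("money", 2), ("upi", 2),
    ("malware", 3), ("virus", 3), ("ransomware", 3), ("infected", 3) ]

def pvExtras : List (List String) :=
  [ ["Report the phishing email to reportphishing@apwg.org",
     "Mark the sender as spam and block them"],
    ["Revoke all active sessions (check 'Security' settings on the platform)",
     "Verify your recovery email/phone hasn't been changed by the attacker"],
    ["Call your bank's 24/7 fraud helpline IMMEDIATELY to freeze the account",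
     "File a complaint at cybercrime.gov.in (India) or your country's cybercrime portal",
     "Keep a record of all transaction IDs and screenshots"],
    ["Disconnect the device from the internet to prevent spread",
     "Do NOT pay any ransom — restore from clean backups instead",
     "Consult a professional IT forensics team if data is critical"] ]

-- port of Source B's recursive _numbered helper
def pvNumbered : List String → Int → String
  | [], _ => ""
  | s :: rest, i => PySem.Int.toStr i ++ ". " ++ s ++ "<br>" ++ pvNumbered rest (i + 1)

def generate_incident_response_alt (answers : List String) : String :=
  let incident_type : String :=
    if answers.isEmpty then "" else PySem.Str.lower (PySem.List.pyGetD answers 0 "")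
  let matched : PySem.Set Int :=
    PySem.Set.ofList
      ((pvKeywords.filter (fun p => PySem.Str.isIn p.1 incident_type)).map Prod.snd)
  let steps : List String :=
    pvGeneric ++
      ((PySem.List.pyRange 0 4 1).filter (fun c => PySem.Set.contains matched c)).flatMap
        (fun c => PySem.List.pyGetD pvExtras c [])
  let header : String :=
    "<b>📋 Incident Report Summary</b><br>" ++
    "━━━━━━━━━━━━━━━━━━━━━━━━<br>" ++
    "<b>Type:</b> " ++ PySem.List.pyGetD answers 0 "" ++ "<br>" ++
    "<b>Time:</b> " ++ PySem.List.pyGetD answers 1 "" ++ "<br>" ++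
    "<b>Description:</b> " ++ PySem.List.pyGetD answers 2 "" ++ "<br>" ++
    "<b>Affected:</b> " ++ PySem.List.pyGetD answers 3 "" ++ "<br>" ++
    "<b>Steps taken:</b> " ++ PySem.List.pyGetD answers 4 "" ++ "<br>" ++
    "━━━━━━━━━━━━━━━━━━━━━━━━<br><br>" ++
    "<b>🚨 Recommended Actions:</b><br>"
  let footer : String :=
    "<br><b>🏛️ Authorities to report to (India):</b><br>" ++
    "• Cyber Crime Portal: <b>cybercrime.gov.in</b><br>" ++
    "• National Helpline: <b>1930</b><br>" ++
    "• Local police cyber cell<br><br>" ++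
    "<i>Stay calm — most incidents are recoverable if acted on quickly. Type 'menu' to return to the main menu.</i>"
  header ++ pvNumbered steps 1 ++ footer

-- ===== PRECONDITION & SPEC =====
-- Pre_ excludes only inputs with fewer than 5 answers, on which the Python A raises IndexError
-- (answers[0]..answers[4] in the header f-string); it returns on every other input.
def Pre_generate_incident_response (answers : List String) : Prop := 5 ≤ answers.length
instance (answers : List String) : Decidable (Pre_generate_incident_response answers) := by
  unfold Pre_generate_incident_response; infer_instance

def pvWitness_generate_incident_response : List String :=
  ["Phishing email", "10am", "clicked a link", "my laptop", "changed password"]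

def Spec_generate_incident_response (answers : List String) (out : String) : Prop := out = generate_incident_response_alt answers
instance (answers : List String) (out : String) : Decidable (Spec_generate_incident_response answers out) := by unfold Spec_generate_incident_response; infer_instance

-- ===== CLAIM (what is proved, stated in full; the proofs are below) =====
def Claim_equal_generate_incident_response : Prop := ∀ (answers : List String), Dom_generate_incident_response answers → Pre_generate_incident_response answers → Spec_generate_incident_response answers (generate_incident_response answers)

-- ===== LEMMAS AND PROOFS =====

-- A's enumerate/foldl accumulation equals B's recursive numbering appended to the accumulator.
lemma pv_fold_enum (l : List String) (i : Int) (r : String) :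
    (PySem.List.enumerate l i).foldl
      (fun acc p => acc ++ (PySem.Int.toStr p.1 ++ ". " ++ p.2 ++ "<br>")) r
      = r ++ pvNumbered l i := by
  induction l generalizing i r with
  | nil => simp [PySem.List.enumerate_nil, pvNumbered]
  | cons x xs ih =>
      rw [PySem.List.enumerate_cons, List.foldl_cons, ih]
      simp [pvNumbered, String.append_assoc]

-- B's matched-set membership for each category index equals A's per-group any-test.
lemma pv_matched (it : String) (c : Int) :
    PySem.Set.contains
      (PySem.Set.ofList
        ((pvKeywords.filter (fun p => PySem.Str.isIn p.1 it)).map Prod.snd)) c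
      = pvKeywords.any (fun p => PySem.Str.isIn p.1 it && p.2 == c) := by
  rw [Bool.eq_iff_iff]
  simp [PySem.Set.contains, PySem.Set.mem_ofList, List.mem_map, List.mem_filter,
        List.any_eq_true]

-- Specialisations of pv_matched to the four category indices.
lemma pv_m0 (it : String) :
    PySem.Set.contains
      (PySem.Set.ofList
        ((pvKeywords.filter (fun p => PySem.Str.isIn p.1 it)).map Prod.snd)) 0
      = (["phishing", "email", "link", "attachment"].any (fun w => PySem.Str.isIn w it)) := by
  rw [pv_matched]; simp [pvKeywords]

lemma pv_m1 (it : String) :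
    PySem.Set.contains
      (PySem.Set.ofList
        ((pvKeywords.filter (fun p => PySem.Str.isIn p.1 it)).map Prod.snd)) 1
      = (["hack", "breach", "unauthorised", "hacked"].any (fun w => PySem.Str.isIn w it)) := by
  rw [pv_matched]; simp [pvKeywords]

lemma pv_m2 (it : String) :
    PySem.Set.contains
      (PySem.Set.ofList
        ((pvKeywords.filter (fun p => PySem.Str.isIn p.1 it)).map Prod.snd)) 2
      = (["financial", "fraud", "bank", "money", "upi"].any (fun w => PySem.Str.isIn w it)) := by
  rw [pv_matched]; simp [pvKeywords]

lemma pv_m3 (it : String) :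
    PySem.Set.contains
      (PySem.Set.ofList
        ((pvKeywords.filter (fun p => PySem.Str.isIn p.1 it)).map Prod.snd)) 3
      = (["malware", "virus", "ransomware", "infected"].any (fun w => PySem.Str.isIn w it)) := by
  rw [pv_matched]; simp [pvKeywords]

-- The two step lists coincide, for every incident_type.
lemma pv_steps (it : String) :
    pvGeneric ++
      ((PySem.List.pyRange 0 4 1).filter
        (fun c => PySem.Set.contains
          (PySem.Set.ofList
            ((pvKeywords.filter (fun p => PySem.Str.isIn p.1 it)).map Prod.snd)) c)).flatMap
        (fun c => PySem.List.pyGetD pvExtras c []) =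
    (let steps : List String :=
      [ "Change passwords on ALL affected accounts immediately",
        "Enable Two-Factor Authentication (2FA) everywhere",
        "Check recent account activity for unauthorised actions",
        "Inform your bank if any financial accounts are involved",
        "Run a full antivirus/malware scan on affected devices" ]
    let steps :=
      if ["phishing", "email", "link", "attachment"].any (fun w => PySem.Str.isIn w it) then
        steps ++ ["Report the phishing email to reportphishing@apwg.org",
                  "Mark the sender as spam and block them"]
      else steps
    let steps :=
      if ["hack", "breach", "unauthorised", "hacked"].any (fun w => PySem.Str.isIn w it) then
        steps ++ ["Revoke all active sessions (check 'Security' settings on the platform)",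
                  "Verify your recovery email/phone hasn't been changed by the attacker"]
      else steps
    let steps :=
      if ["financial", "fraud", "bank", "money", "upi"].any (fun w => PySem.Str.isIn w it) then
        steps ++ ["Call your bank's 24/7 fraud helpline IMMEDIATELY to freeze the account",
                  "File a complaint at cybercrime.gov.in (India) or your country's cybercrime portal",
                  "Keep a record of all transaction IDs and screenshots"]
      else steps
    if ["malware", "virus", "ransomware", "infected"].any (fun w => PySem.Str.isIn w it) then
      steps ++ ["Disconnect the device from the internet to prevent spread",
                "Do NOT pay any ransom — restore from clean backups instead",
                "Consult a professional IT forensics team if data is critical"]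
    else steps) := by
  have hr : PySem.List.pyRange 0 4 1 = [0, 1, 2, 3] := by decide
  rw [hr]
  simp only [List.filter_cons, List.filter_nil, pv_m0 it, pv_m1 it, pv_m2 it, pv_m3 it]
  generalize (["phishing", "email", "link", "attachment"].any (fun w => PySem.Str.isIn w it)) = b1
  generalize (["hack", "breach", "unauthorised", "hacked"].any (fun w => PySem.Str.isIn w it)) = b2
  generalize (["financial", "fraud", "bank", "money", "upi"].any (fun w => PySem.Str.isIn w it)) = b3
  generalize (["malware", "virus", "ransomware", "infected"].any (fun w => PySem.Str.isIn w it)) = b4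
  cases b1 <;> cases b2 <;> cases b3 <;> cases b4 <;>
    simp [pvGeneric, pvExtras, PySem.List.pyGetD]

-- ===== VERDICT (by name: the statement is the Claim_ definition above) =====
theorem generate_incident_response_spec : Claim_equal_generate_incident_response := by
  intro answers _ _
  unfold Spec_generate_incident_response generate_incident_response generate_incident_response_alt
  simp only []
  rw [pv_fold_enum, pv_steps]
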